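-- pv_equiv track=rewrite | github.com/wesheets/personal-ai-agent | app/modules/symbolic_memory_encoder.py | find_related_concepts
-- ===== SOURCE A (Python) =====
-- from typing import Dict, Any, List, Optional, Tuple, Set
--
-- def find_related_concepts(concept_id: str, concepts: List[Dict[str, Any]]) -> List[str]:
--     """
--     Find concepts related to a given concept.
--
--     Args:
--         concept_id: The ID of the concept
--         concepts: List of all concepts
--
--     Returns:
--         List of related concept IDs
--     """
--     # In a real implementation, this would use semantic similarity
--     # For this mock implementation, we'll use a simple approach
--
--     related_concepts = []
--
--     # Find the target concept
--     target_concept = None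
--     for concept in concepts:
--         if concept["id"] == concept_id:
--             target_concept = concept
--             break
--
--     if not target_concept:
--         return []
--
--     # Find concepts with similar names
--     target_name = target_concept["name"].lower()
--     for concept in concepts:
--         if concept["id"] != concept_id:
--             concept_name = concept["name"].lower()
--
--             # Check if names share words
--             target_words = set(target_name.split())
--             concept_words = set(concept_name.split())
--
--             if target_words.intersection(concept_words):
--                 related_concepts.append(f"concept:{concept['id']}")
--
--     return related_concepts
-- ===== SOURCE B (Python) =====
-- def find_related_concepts(concept_id, concepts):
--     """
--     Find concepts related to a given concept (inverted-index re-implementation).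
--     """
--     target = next((c for c in concepts if c["id"] == concept_id), None)
--     if target is None:
--         return []
--     index = {}  # lowercased name-word -> positions of non-target-id concepts containing it
--     for i, c in enumerate(concepts):
--         if c["id"] != concept_id:
--             for w in c["name"].lower().split():
--                 index.setdefault(w, []).append(i)
--     hits = set()
--     for w in target["name"].lower().split():
--         hits.update(index.get(w, ()))
--     return [f"concept:{concepts[i]['id']}" for i in sorted(hits)]
-- ===== Notes on version B (the rewrite author's own statement) =====
-- stated objective: alternative
-- what changed: Replaces A's per-concept set-intersection scan against the target's words by an inverted index built in one pass over the non-target concepts (word -> concept positions), whose postings for the target's words are unioned into a position set, sorted, and formatted.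
import Mathlib
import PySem

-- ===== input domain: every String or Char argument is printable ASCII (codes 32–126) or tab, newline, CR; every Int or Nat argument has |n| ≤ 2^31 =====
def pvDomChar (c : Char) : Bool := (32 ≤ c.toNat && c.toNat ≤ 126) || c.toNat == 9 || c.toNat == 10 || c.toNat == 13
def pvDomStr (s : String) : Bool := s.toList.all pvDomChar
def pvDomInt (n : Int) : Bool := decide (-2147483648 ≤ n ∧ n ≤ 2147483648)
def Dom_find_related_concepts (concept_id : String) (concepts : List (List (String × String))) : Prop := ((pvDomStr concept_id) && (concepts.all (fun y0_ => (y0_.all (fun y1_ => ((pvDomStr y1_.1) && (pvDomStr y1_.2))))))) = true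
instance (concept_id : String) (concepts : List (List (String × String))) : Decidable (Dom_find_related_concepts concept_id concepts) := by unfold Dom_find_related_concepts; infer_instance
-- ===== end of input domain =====

-- B replaces A's per-concept set-intersection against the target's name-words by an
-- inverted index (word -> positions of non-target-id concepts) built in one pass;
-- alternative algorithm, not claimed faster.  Return value only (neither mutates).

-- shared transliteration helpers: c["id"], and set-free c["name"].lower().split()
def pvId (c : List (String × String)) : String := (PySem.Dict.ofList c).getD "id" ""
def pvWords (c : List (String × String)) : List String :=
  PySem.Str.split₀ (PySem.Str.lower ((PySem.Dict.ofList c).getD "name" ""))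

-- ===== PORT A =====
-- the first loop of A: find the first concept whose "id" equals concept_id (break)
def pvFindTarget (concept_id : String) : List (List (String × String)) → Option (List (String × String))
  | [] => none
  | c :: rest => if pvId c == concept_id then some c else pvFindTarget concept_id rest

def find_related_concepts (concept_id : String) (concepts : List (List (String × String))) : List String :=
  match pvFindTarget concept_id concepts with
  | none => []
  | some target =>
    concepts.foldl (fun related c =>
      if (pvId c == concept_id) = false then
        let target_words := PySem.Set.ofList (pvWords target)
        let concept_words := PySem.Set.ofList (pvWords c)
        if PySem.Set.inter target_words concept_words ≠ [] then
          related ++ ["concept:" ++ pvId c]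
        else related
      else related) []

-- ===== PORT B =====
def find_related_concepts_alt (concept_id : String) (concepts : List (List (String × String))) : List String :=
  match concepts.find? (fun c => pvId c == concept_id) with   -- next((c for c in concepts if …), None)
  | none => []
  | some target =>
    let ix := (PySem.List.enumerate concepts 0).foldl (fun d p =>
        if (pvId p.2 == concept_id) = false then
          (pvWords p.2).foldl (fun d w => PySem.Dict.modify d w [] (fun l => l ++ [p.1])) d
        else d) PySem.Dict.empty
    let hits := (pvWords target).foldl
        (fun s w => PySem.Set.update s (PySem.Dict.getD ix w [])) PySem.Set.empty
    (PySem.List.sorted hits (fun x => x)).map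
      (fun i => "concept:" ++ pvId (PySem.List.pyGetD concepts i []))

-- ===== PRECONDITION & SPEC =====
-- Pre_ is exactly Python A's non-raise domain: every concept dict has an "id" key, and
-- when a target is found, the target and every concept with a different id have a
-- "name" key (A raises KeyError otherwise; B raises on exactly the same inputs).
def Pre_find_related_concepts (concept_id : String) (concepts : List (List (String × String))) : Prop :=
  ((concepts.all (fun c => (PySem.Dict.ofList c).contains "id")) &&
   (match concepts.find? (fun c => pvId c == concept_id) with
    | none => true
    | some t => (PySem.Dict.ofList t).contains "name" &&
        concepts.all (fun c => (pvId c == concept_id) || (PySem.Dict.ofList c).contains "name"))) = true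
instance (concept_id : String) (concepts : List (List (String × String))) : Decidable (Pre_find_related_concepts concept_id concepts) := by unfold Pre_find_related_concepts; infer_instance

def pvWitness_find_related_concepts : String × (List (List (String × String))) :=
  ("c1", [[("id", "c1"), ("name", "Big Apple")], [("id", "c2"), ("name", "apple pie")], [("id", "c3"), ("name", "dog")]])

def Spec_find_related_concepts (concept_id : String) (concepts : List (List (String × String))) (out : List String) : Prop := out = find_related_concepts_alt concept_id concepts
instance (concept_id : String) (concepts : List (List (String × String))) (out : List String) : Decidable (Spec_find_related_concepts concept_id concepts out) := by unfold Spec_find_related_concepts; infer_instance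

-- ===== CLAIM (what is proved, stated in full; the proofs are below) =====
def Claim_equal_find_related_concepts : Prop := ∀ (concept_id : String) (concepts : List (List (String × String))), Dom_find_related_concepts concept_id concepts → Pre_find_related_concepts concept_id concepts → Spec_find_related_concepts concept_id concepts (find_related_concepts concept_id concepts)

-- ===== LEMMAS AND PROOFS =====

theorem pv_find_eq (concept_id : String) (l : List (List (String × String))) :
    pvFindTarget concept_id l = l.find? (fun c => pvId c == concept_id) := by
  induction l with
  | nil => rfl
  | cons c l ih =>
    rw [pvFindTarget, List.find?_cons]
    by_cases h : (pvId c == concept_id) = true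
    · simp [h]
    · simp [h, ih]

theorem pv_inner_index (ws : List String) (i : Int) (d : PySem.Dict String (List Int)) (w : String) (j : Int) :
    j ∈ (ws.foldl (fun d w => PySem.Dict.modify d w [] (fun l => l ++ [i])) d).getD w []
      ↔ j ∈ d.getD w [] ∨ (w ∈ ws ∧ j = i) := by
  induction ws generalizing d with
  | nil => simp
  | cons v ws ih =>
    rw [List.foldl_cons, ih]
    by_cases h : w = v
    · subst h
      rw [PySem.Dict.getD_modify_self]
      simp
      tauto
    · rw [PySem.Dict.getD_modify_of_ne _ _ _ h]
      simp [h]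

theorem pv_index_mem (cid : String) (l : List (List (String × String))) (s : Int)
    (d : PySem.Dict String (List Int)) (w : String) (j : Int) :
    j ∈ ((PySem.List.enumerate l s).foldl (fun d p =>
          if (pvId p.2 == cid) = false then
            (pvWords p.2).foldl (fun d w => PySem.Dict.modify d w [] (fun l => l ++ [p.1])) d
          else d) d).getD w []
      ↔ j ∈ d.getD w [] ∨
        ∃ k : Nat, ∃ h : k < l.length, (pvId l[k] == cid) = false ∧ w ∈ pvWords l[k] ∧ j = s + k := by
  induction l generalizing s d with
  | nil => simp
  | cons c l ih =>
    rw [PySem.List.enumerate_cons, List.foldl_cons]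
    by_cases hc : (pvId c == cid) = false
    · rw [if_pos hc, ih, pv_inner_index]
      constructor
      · rintro ((h1 | ⟨h2, rfl⟩) | ⟨k, hk, hg, hw, rfl⟩)
        · exact Or.inl h1
        · exact Or.inr ⟨0, by simp, by simpa using hc, by simpa using h2, by simp⟩
        · exact Or.inr ⟨k + 1, by simpa using hk, by simpa using hg, by simpa using hw, by push_cast; ring⟩
      · rintro (h1 | ⟨k, hk, hg, hw, rfl⟩)
        · exact Or.inl (Or.inl h1)
        · cases k with
          | zero => exact Or.inl (Or.inr ⟨by simpa using hw, by simp⟩)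
          | succ k => exact Or.inr ⟨k, by simpa using hk, by simpa using hg, by simpa using hw, by push_cast; ring⟩
    · rw [if_neg hc, ih]
      constructor
      · rintro (h1 | ⟨k, hk, hg, hw, rfl⟩)
        · exact Or.inl h1
        · exact Or.inr ⟨k + 1, by simpa using hk, by simpa using hg, by simpa using hw, by push_cast; ring⟩
      · rintro (h1 | ⟨k, hk, hg, hw, rfl⟩)
        · exact Or.inl h1
        · cases k with
          | zero => exact absurd (by simpa using hg) hc
          | succ k => exact Or.inr ⟨k, by simpa using hk, by simpa using hg, by simpa using hw, by push_cast; ring⟩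

theorem pv_hits_mem (tws : List String) (ix : PySem.Dict String (List Int)) (s0 : PySem.Set Int) (j : Int) :
    j ∈ tws.foldl (fun s w => PySem.Set.update s (PySem.Dict.getD ix w [])) s0
      ↔ j ∈ s0 ∨ ∃ w ∈ tws, j ∈ ix.getD w [] := by
  induction tws generalizing s0 with
  | nil => simp
  | cons v tws ih =>
    rw [List.foldl_cons, ih, PySem.Set.mem_update]
    simp
    tauto

theorem pv_hits_nodup (tws : List String) (ix : PySem.Dict String (List Int)) :
    (tws.foldl (fun s w => PySem.Set.update s (PySem.Dict.getD ix w [])) PySem.Set.empty).Nodup := by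
  have : ∀ (s0 : PySem.Set Int), s0.Nodup →
      (tws.foldl (fun s w => PySem.Set.update s (PySem.Dict.getD ix w [])) s0).Nodup := by
    induction tws with
    | nil => intro s0 h; exact h
    | cons v tws ih => intro s0 h; exact ih _ (PySem.Set.nodup_update _ _ h)
  exact this _ (by simp [PySem.Set.empty])

theorem pv_filter_map_index {α β : Type} (dflt : α) (l : List α) (p : α → Bool) (f : α → β) :
    ((List.range l.length).filter (fun k => p (l.getD k dflt))).map (fun k => f (l.getD k dflt))
      = (l.filter p).map f := by
  induction l with
  | nil => simp
  | cons x l ih =>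
    rw [List.length_cons, List.range_succ_eq_map, List.filter_cons, List.filter_map]
    rw [show ((fun k => p ((x :: l).getD k dflt)) ∘ Nat.succ) = fun k => p (l.getD k dflt) from by
      funext k; simp]
    have hmap : List.map (fun k => f ((x :: l).getD k dflt))
        (List.map Nat.succ (List.filter (fun k => p (l.getD k dflt)) (List.range l.length)))
        = List.map f (List.filter p l) := by
      rw [List.map_map]
      rw [show ((fun k => f ((x :: l).getD k dflt)) ∘ Nat.succ) = fun k => f (l.getD k dflt) from by
        funext k; simp]
      exact ih
    by_cases hp : p x = true
    · rw [if_pos (by simpa using hp), List.map_cons, hmap, List.filter_cons_of_pos hp, List.map_cons]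
      simp
    · rw [if_neg (by simpa using hp), hmap, List.filter_cons_of_neg (by simpa using hp)]

-- Nat position to Python int index (kept abstract to control coercion unfolding)
def pvCast (k : Nat) : Int := k

theorem pv_inter_ne_nil (tws ws : List String) :
    (PySem.Set.ofList tws).inter (PySem.Set.ofList ws) ≠ [] ↔ ∃ w ∈ tws, w ∈ ws := by
  constructor
  · intro h
    obtain ⟨x, hx⟩ := List.exists_mem_of_ne_nil _ h
    rw [PySem.Set.mem_inter] at hx
    exact ⟨x, (PySem.Set.mem_ofList _ _).mp hx.1, (PySem.Set.mem_ofList _ _).mp hx.2⟩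
  · rintro ⟨w, h1, h2⟩
    exact List.ne_nil_of_mem ((PySem.Set.mem_inter _ _ _).mpr
      ⟨(PySem.Set.mem_ofList _ _).mpr h1, (PySem.Set.mem_ofList _ _).mpr h2⟩)

-- ===== VERDICT (by name: the statement is the Claim_ definition above) =====
theorem find_related_concepts_spec : Claim_equal_find_related_concepts := by
  unfold Claim_equal_find_related_concepts
  intro cid concepts _ _
  unfold Spec_find_related_concepts
  simp only [find_related_concepts, find_related_concepts_alt]
  rw [pv_find_eq]
  cases htgt : concepts.find? (fun c => pvId c == cid) with
  | none => rfl
  | some target =>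
    simp only
    set tws := pvWords target with htws
    set ix := (PySem.List.enumerate concepts 0).foldl (fun d p =>
        if (pvId p.2 == cid) = false then
          (pvWords p.2).foldl (fun d w => PySem.Dict.modify d w [] (fun l => l ++ [p.1])) d
        else d) PySem.Dict.empty with hix
    set hits := tws.foldl (fun s w => PySem.Set.update s (PySem.Dict.getD ix w [])) PySem.Set.empty with hhits
    have hempty : ∀ w : String, (PySem.Dict.empty : PySem.Dict String (List Int)).getD w [] = [] := by
      intro w; rfl
    have hmem : ∀ j : Int, j ∈ hits ↔
        ∃ k : Nat, ∃ _ : k < concepts.length,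
          ((pvId concepts[k] == cid) = false ∧ ∃ w ∈ tws, w ∈ pvWords concepts[k]) ∧ j = pvCast k := by
      intro j
      rw [hhits, pv_hits_mem]
      simp only [hix, pv_index_mem, hempty, List.not_mem_nil, false_or, PySem.Set.empty]
      constructor
      · rintro ⟨w, hw, k, hk, hg, hwk, rfl⟩
        exact ⟨k, hk, ⟨hg, w, hw, hwk⟩, by simp [pvCast]⟩
      · rintro ⟨k, hk, ⟨hg, w, hw, hwk⟩, rfl⟩
        exact ⟨w, hw, k, hk, hg, hwk, by simp [pvCast]⟩
    have hsort : PySem.List.sorted hits (fun x => x) =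
        ((List.range concepts.length).filter
            (fun k => decide ((pvId (concepts.getD k []) == cid) = false) &&
              decide (∃ w ∈ tws, w ∈ pvWords (concepts.getD k [])))).map pvCast := by
      apply PySem.List.sorted_eq_of_perm_of_pairwise_lt
      · rw [List.perm_ext_iff_of_nodup
          (((List.nodup_range).filter _).map (fun a b h => by simpa [pvCast] using h))
          (pv_hits_nodup _ _)]
        intro j
        rw [hmem j]
        simp only [List.mem_map, List.mem_filter, List.mem_range, decide_eq_true_eq, Bool.and_eq_true]
        constructor
        · rintro ⟨k, ⟨hk, hg, hsh⟩, rfl⟩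
          exact ⟨k, hk, ⟨by rw [List.getD_eq_getElem _ _ hk] at hg; exact hg,
            by rw [List.getD_eq_getElem _ _ hk] at hsh; exact hsh⟩, rfl⟩
        · rintro ⟨k, hk, ⟨hg, hsh⟩, rfl⟩
          exact ⟨k, ⟨hk, by rw [List.getD_eq_getElem _ _ hk]; exact hg,
            by rw [List.getD_eq_getElem _ _ hk]; exact hsh⟩, rfl⟩
      · exact List.Pairwise.map _ (fun a b h => by simpa [pvCast] using h)
          ((List.pairwise_lt_range).filter _)
    rw [hsort, List.map_map]
    rw [show ((fun i => "concept:" ++ pvId (PySem.List.pyGetD concepts i [])) ∘ pvCast)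
        = fun k : Nat => "concept:" ++ pvId (concepts.getD k []) from by
      funext k; simp [pvCast, PySem.List.pyGetD_natCast]]
    have hfin := pv_filter_map_index ([] : List (String × String)) concepts
      (fun c => decide ((pvId c == cid) = false) && decide (∃ w ∈ tws, w ∈ pvWords c))
      (fun c => "concept:" ++ pvId c)
    rw [hfin]
    rw [show (fun (related : List String) c =>
          if (pvId c == cid) = false then
            if (PySem.Set.ofList tws).inter (PySem.Set.ofList (pvWords c)) ≠ [] then
              related ++ ["concept:" ++ pvId c]
            else related
          else related)
        = fun (acc : List String) c =>
          if (decide ((pvId c == cid) = false) && decide (∃ w ∈ tws, w ∈ pvWords c)) = true then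
            acc ++ ["concept:" ++ pvId c]
          else acc from by
      funext acc c
      by_cases h1 : (pvId c == cid) = false
      · by_cases h2 : ∃ w ∈ tws, w ∈ pvWords c
        · rw [if_pos h1, if_pos ((pv_inter_ne_nil _ _).mpr h2), if_pos (by simp [h1, h2])]
        · rw [if_pos h1, if_neg (fun hc => h2 ((pv_inter_ne_nil _ _).mp hc)), if_neg (by simp [h2])]
      · rw [if_neg h1, if_neg (by simp [h1])]]
    rw [PySem.List.foldl_append_if]
    rfl
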